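-- pv_equiv track=rewrite | github.com/KrisNguyen135/Project-Euler | solutions/p231/main.py | solve
-- ===== SOURCE A (Python) =====
-- from math import sqrt
--
-- def get_primes(limit):
--     sieve = [True] * limit
--     new_limit = int(sqrt(limit)) + 1
--     for i in range(2, new_limit):
--         if sieve[i]:
--             for j in range(i * 2, limit, i): sieve[j] = False
--     return [i for i in range(2, limit) if sieve[i]]
--
-- def factor(num, primes):
--     result = {}
--     for prime in primes:
--         divisor = prime
--         temp_sum = 0
--         while divisor <= num:
--             temp_sum += num // divisor
--             divisor *= prime
--         result[prime] = temp_sum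
--     return result
--
-- def solve(upper, lower):
--     difference = upper - lower
--     primes = get_primes(upper)
--     factor_upper = factor(upper, primes)
--     factor_lower = factor(lower, primes)
--     factor_diff = factor(difference, primes)
--     result = {}
--     temp_sum = 0
--     for prime in primes:
--         result[prime] = factor_upper[prime] - factor_lower[prime] - factor_diff[prime]
--         temp_sum += prime * result[prime]
--     return temp_sum
-- ===== SOURCE B (Python) =====
-- from math import sqrt
--
-- def get_primes(limit):
--     sieve = [True] * limit
--     new_limit = int(sqrt(limit)) + 1
--     for i in range(2, new_limit):
--         if sieve[i]:
--             for j in range(i * 2, limit, i): sieve[j] = False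
--     return [i for i in range(2, limit) if sieve[i]]
--
-- def legendre(n, p):
--     # exponent of prime p in n! via Legendre's digit-sum formula; 0 for n <= 0
--     if n <= 0:
--         return 0
--     s = 0
--     m = n
--     while m > 0:
--         s += m % p
--         m //= p
--     return (n - s) // (p - 1)
--
-- def solve(upper, lower):
--     total = 0
--     for p in get_primes(upper):
--         total += p * (legendre(upper, p) - legendre(lower, p) - legendre(upper - lower, p))
--     return total
-- ===== Notes on version B (the rewrite author's own statement) =====
-- stated objective: alternative
-- what changed: Per-prime exponents are computed by Legendre's digit-sum formula (n - s_p(n))/(p-1) in a single base-p digit loop per number, instead of building three divisor-power-sum dicts and subtracting dict lookups; no dicts are kept at all.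
import Mathlib
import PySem

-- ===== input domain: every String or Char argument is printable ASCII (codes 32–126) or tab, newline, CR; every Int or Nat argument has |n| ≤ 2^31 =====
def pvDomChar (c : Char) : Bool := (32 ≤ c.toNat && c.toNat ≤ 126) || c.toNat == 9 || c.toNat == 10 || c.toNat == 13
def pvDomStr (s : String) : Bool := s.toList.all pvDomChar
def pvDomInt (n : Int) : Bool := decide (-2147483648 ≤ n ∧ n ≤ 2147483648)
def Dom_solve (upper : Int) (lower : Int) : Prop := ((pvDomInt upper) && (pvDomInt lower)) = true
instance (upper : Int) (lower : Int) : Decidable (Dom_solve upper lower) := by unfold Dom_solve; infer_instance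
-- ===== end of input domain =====

-- B computes each prime's exponent with Legendre's digit-sum formula (one base-p digit loop
-- per number) instead of A's three divisor-power-sum dicts; same asymptotic cost (alternative).

-- ===== PORT A =====

-- get_primes(limit): sieve of Eratosthenes.  int(sqrt(limit)) is ported as Nat.sqrt, which
-- equals Python's int(math.sqrt(limit)) for every 0 ≤ limit ≤ 2^31 (double sqrt is exact
-- enough on that range).  The Python list of booleans is an Array Bool (a Python list is an
-- array); the indices i, j are provably nonnegative and in range here, so getD/setIfInBounds
-- on .toNat are exact.  Shared verbatim by A and B (Source B keeps get_primes as-is).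
def getPrimes (limit : Int) : List Int :=
  let sieve := Array.replicate limit.toNat true
  let newLimit : Int := (Nat.sqrt limit.toNat : Int) + 1
  let sieve := (PySem.List.pyRange 2 newLimit 1).foldl (fun sv i =>
      if sv.getD i.toNat false then
        (PySem.List.pyRange (i * 2) limit i).foldl (fun sv2 j => sv2.setIfInBounds j.toNat false) sv
      else sv) sieve
  (PySem.List.pyRange 2 limit 1).filter (fun i => sieve.getD i.toNat false)

-- the 'while divisor <= num' loop of factor; the extra 'divisor < divisor * p' conjunct is a
-- pure totality guard (it always holds when p ≥ 2 and divisor > 0, which every call satisfies)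
def factorLoop (num p divisor acc : Int) : Int :=
  if h : divisor ≤ num ∧ divisor < divisor * p then
    factorLoop num p (divisor * p) (acc + PySem.Int.floordiv num divisor)
  else acc
termination_by (num + 1 - divisor).toNat
decreasing_by omega

-- factor(num, primes).  The Python dict is ported as Std.HashMap — like CPython's dict a
-- hash map with O(1) insert/lookup (an association list would not evaluate on large inputs);
-- only insert and lookup are used, the dict's iteration order is never observed.
def factorDict (num : Int) (primes : List Int) : Std.HashMap Int Int :=
  primes.foldl (fun d p => d.insert p (factorLoop num p p 0)) ∅

-- solve(upper, lower).  factor_upper[prime] etc. can never raise KeyError (the dicts were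
-- built over the very same primes list), so getD's default 0 is unreachable.
def solve (upper : Int) (lower : Int) : Int :=
  let difference := upper - lower
  let primes := getPrimes upper
  let factorUpper := factorDict upper primes
  let factorLower := factorDict lower primes
  let factorDiff := factorDict difference primes
  (primes.foldl (fun (st : Std.HashMap Int Int × Int) prime =>
      let r := st.1.insert prime
        (factorUpper.getD prime 0 - factorLower.getD prime 0 - factorDiff.getD prime 0)
      (r, st.2 + prime * r.getD prime 0)) (∅, 0)).2

-- ===== PORT B =====

-- the 'while m > 0' digit-sum loop of legendre; '1 < p' is a pure totality guard
-- (every call has p ≥ 2, a prime)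
def digitSumLoop (m p s : Int) : Int :=
  if h : 0 < m ∧ 1 < p then
    digitSumLoop (PySem.Int.floordiv m p) p (s + PySem.Int.mod m p)
  else s
termination_by m.toNat
decreasing_by
  rw [PySem.Int.floordiv_eq_ediv_of_pos (by omega)]
  have h1 := Int.mul_ediv_add_emod m p
  have h2 := Int.emod_nonneg m (by omega : p ≠ 0)
  have h3 := Int.ediv_nonneg (le_of_lt h.1) (by omega : (0:Int) ≤ p)
  have h4 : 2 * (m / p) ≤ p * (m / p) :=
    mul_le_mul_of_nonneg_right (by omega : (2:Int) ≤ p) h3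
  omega

-- legendre(n, p)
def legendre (n p : Int) : Int :=
  if n ≤ 0 then 0
  else PySem.Int.floordiv (n - digitSumLoop n p 0) (p - 1)

def solve_alt (upper : Int) (lower : Int) : Int :=
  (getPrimes upper).foldl (fun total p =>
    total + p * (legendre upper p - legendre lower p - legendre (upper - lower) p)) 0

-- ===== PRECONDITION & SPEC =====
-- Pre excludes upper < 0, where Python A raises ValueError (math.sqrt of a negative).
def Pre_solve (upper : Int) (lower : Int) : Prop := 0 ≤ upper
instance (upper : Int) (lower : Int) : Decidable (Pre_solve upper lower) := by
  unfold Pre_solve; infer_instance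

def pvWitness_solve : Int × Int := (20, 5)

def Spec_solve (upper : Int) (lower : Int) (out : Int) : Prop := out = solve_alt upper lower
instance (upper : Int) (lower : Int) (out : Int) : Decidable (Spec_solve upper lower out) := by
  unfold Spec_solve; infer_instance

-- ===== CLAIM (what is proved, stated in full; the proofs are below) =====
def Claim_equal_solve : Prop := ∀ (upper : Int) (lower : Int),
  Dom_solve upper lower → Pre_solve upper lower → Spec_solve upper lower (solve upper lower)

-- ===== LEMMAS AND PROOFS =====

-- the Legendre sum Σ_{k≥0} m // p^k as a recursive function (proof-side helper)
def legSum (p m : Int) : Int :=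
  if h : 0 < m ∧ 1 < p then m + legSum p (PySem.Int.floordiv m p) else 0
termination_by m.toNat
decreasing_by
  rw [PySem.Int.floordiv_eq_ediv_of_pos (by omega)]
  have h1 := Int.mul_ediv_add_emod m p
  have h2 := Int.emod_nonneg m (by omega : p ≠ 0)
  have h3 := Int.ediv_nonneg (le_of_lt h.1) (by omega : (0:Int) ≤ p)
  have h4 : 2 * (m / p) ≤ p * (m / p) :=
    mul_le_mul_of_nonneg_right (by omega : (2:Int) ≤ p) h3
  omega

lemma legSum_nonpos {p m : Int} (hm : m ≤ 0) : legSum p m = 0 := by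
  rw [legSum]; simp [show ¬(0 < m ∧ 1 < p) by omega]

-- accumulator form of the digit-sum loop
lemma digitSumLoop_acc (m p s : Int) : digitSumLoop m p s = s + digitSumLoop m p 0 := by
  conv_lhs => rw [digitSumLoop]
  conv_rhs => rw [digitSumLoop]
  by_cases h : 0 < m ∧ 1 < p
  · rw [dif_pos h, dif_pos h, digitSumLoop_acc (PySem.Int.floordiv m p) p (s + PySem.Int.mod m p),
      digitSumLoop_acc (PySem.Int.floordiv m p) p (0 + PySem.Int.mod m p)]
    ring
  · rw [dif_neg h, dif_neg h]; ring
termination_by m.toNat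
decreasing_by all_goals
  rw [PySem.Int.floordiv_eq_ediv_of_pos (by omega)]
  have h1 := Int.mul_ediv_add_emod m p
  have h2 := Int.emod_nonneg m (by omega : p ≠ 0)
  have h3 := Int.ediv_nonneg (le_of_lt h.1) (by omega : (0:Int) ≤ p)
  have h4 : 2 * (m / p) ≤ p * (m / p) :=
    mul_le_mul_of_nonneg_right (by omega : (2:Int) ≤ p) h3
  omega

-- A's while-loop computes acc + legSum of num // divisor
lemma factorLoop_eq_legSum (num p : Int) (hp : 1 < p) (divisor acc : Int) (hd : 0 < divisor) :
    factorLoop num p divisor acc = acc + legSum p (PySem.Int.floordiv num divisor) := by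
  have hdp : divisor < divisor * p := by nlinarith
  rw [factorLoop]
  by_cases hle : divisor ≤ num
  · rw [dif_pos ⟨hle, hdp⟩,
      factorLoop_eq_legSum num p hp (divisor * p) _ (by positivity)]
    have hq : 0 < PySem.Int.floordiv num divisor := by
      have := (PySem.Int.le_floordiv_iff_mul_le (a := num) (b := divisor) (q := 1) hd).mpr (by omega)
      omega
    have hcomp : PySem.Int.floordiv (PySem.Int.floordiv num divisor) p
        = PySem.Int.floordiv num (divisor * p) := by
      rw [PySem.Int.floordiv_eq_ediv_of_pos hd, PySem.Int.floordiv_eq_ediv_of_pos (by omega),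
        PySem.Int.floordiv_eq_ediv_of_pos (by positivity)]
      exact Int.ediv_ediv_of_nonneg (by omega)
    conv_rhs => rw [legSum, dif_pos ⟨hq, hp⟩]
    rw [hcomp]; ring
  · rw [dif_neg (by tauto)]
    have : PySem.Int.floordiv num divisor < 1 :=
      (PySem.Int.floordiv_lt_iff_lt_mul hd).mpr (by omega)
    rw [legSum_nonpos (by omega)]; ring
termination_by (num + 1 - divisor).toNat
decreasing_by omega

-- key identity: (p-1) * Sum_{k>=1} n // p^k  =  n - s_p(n)   for n >= 0
lemma legSum_digit (p : Int) (hp : 1 < p) (n : Int) (hn : 0 ≤ n) :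
    (p - 1) * legSum p (PySem.Int.floordiv n p) = n - digitSumLoop n p 0 := by
  by_cases h0 : n = 0
  · subst h0
    rw [digitSumLoop, dif_neg (by omega)]
    rw [show PySem.Int.floordiv 0 p = 0 by
      rw [PySem.Int.floordiv_eq_ediv_of_pos (by omega)]; simp]
    rw [legSum_nonpos le_rfl]; ring
  · have hpos : 0 < n := by omega
    set q := PySem.Int.floordiv n p with hqdef
    have hmod := PySem.Int.floordiv_mul_add_mod n p
    have hr0 := PySem.Int.mod_nonneg (a := n) (b := p) (by omega)
    have hrp := PySem.Int.mod_lt (a := n) (b := p) (by omega)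
    have hq0 : 0 ≤ q := by
      rw [hqdef, PySem.Int.floordiv_eq_ediv_of_pos (by omega)]
      exact Int.ediv_nonneg hn (by omega)
    have hS : digitSumLoop n p 0 = PySem.Int.mod n p + digitSumLoop q p 0 := by
      rw [digitSumLoop, dif_pos ⟨hpos, hp⟩, digitSumLoop_acc]; ring
    by_cases hq : 0 < q
    · have hlt : q.toNat < n.toNat := by
        have : q < n := by nlinarith [hmod, hr0]
        omega
      have ih := legSum_digit p hp q hq0
      conv_lhs => rw [legSum, dif_pos ⟨hq, hp⟩]
      rw [hS]
      linear_combination ih + hmod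
    · have hq0' : q = 0 := by omega
      have hfd0 : PySem.Int.floordiv n p = 0 := by omega
      rw [hfd0] at hmod
      rw [hq0', legSum_nonpos le_rfl, hS, hq0',
        show digitSumLoop 0 p 0 = 0 by rw [digitSumLoop, dif_neg (by omega)]]
      omega
termination_by n.toNat

lemma legendre_eq_legSum (n p : Int) (hp : 1 < p) :
    legendre n p = legSum p (PySem.Int.floordiv n p) := by
  unfold legendre
  by_cases hn : n ≤ 0
  · rw [if_pos hn]
    have : PySem.Int.floordiv n p < 1 :=
      (PySem.Int.floordiv_lt_iff_lt_mul (by omega)).mpr (by nlinarith)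
    rw [legSum_nonpos (by omega)]
  · rw [if_neg hn, show n - digitSumLoop n p 0
        = (p - 1) * legSum p (PySem.Int.floordiv n p) from
        (legSum_digit p hp n (by omega)).symm,
      PySem.Int.floordiv_eq_ediv_of_pos (by omega : (0:Int) < p - 1),
      Int.mul_ediv_cancel_left _ (by omega : p - 1 ≠ 0)]

-- per-prime agreement of the two programs
lemma perPrime (n p : Int) (hp : 1 < p) : factorLoop n p p 0 = legendre n p := by
  rw [factorLoop_eq_legSum n p hp p 0 (by omega), legendre_eq_legSum n p hp]
  ring

lemma getD_factorDict_aux (num : Int) (p : Int) :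
    ∀ (l : List Int) (d : Std.HashMap Int Int),
      (l.foldl (fun d q => d.insert q (factorLoop num q q 0)) d).getD p 0
        = if p ∈ l then factorLoop num p p 0 else d.getD p 0 := by
  intro l
  induction l with
  | nil => simp
  | cons q tl ih =>
      intro d
      simp only [List.foldl_cons]
      rw [ih]
      by_cases hm : p ∈ tl
      · simp [hm]
      · by_cases hq : p = q
        · subst hq; simp [hm, Std.HashMap.getD_insert_self]
        · simp [hm, hq, Std.HashMap.getD_insert, Ne.symm hq]

lemma getD_factorDict (num : Int) (primes : List Int) (p : Int) (hp : p ∈ primes) :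
    (factorDict num primes).getD p 0 = factorLoop num p p 0 := by
  unfold factorDict
  rw [getD_factorDict_aux num p primes ∅]
  simp [hp]

lemma mem_getPrimes {p limit : Int} (h : p ∈ getPrimes limit) : 2 ≤ p := by
  unfold getPrimes at h
  have := (List.mem_filter.mp h).1
  exact (PySem.List.mem_pyRange_one.mp this).1

-- A's summing loop ignores its dict accumulator
lemma foldA_snd (e : Int → Int) :
    ∀ (l : List Int) (d : Std.HashMap Int Int) (t : Int),
      (l.foldl (fun (st : Std.HashMap Int Int × Int) prime =>
          let r := st.1.insert prime (e prime)
          (r, st.2 + prime * r.getD prime 0)) (d, t)).2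
        = l.foldl (fun t prime => t + prime * e prime) t := by
  intro l
  induction l with
  | nil => intro d t; rfl
  | cons q tl ih =>
      intro d t
      simp only [List.foldl_cons]
      rw [ih]
      simp [Std.HashMap.getD_insert_self]

-- ===== VERDICT (by name: the statement is the Claim_ definition above) =====
theorem solve_spec : Claim_equal_solve := by
  intro upper lower _ _
  unfold Spec_solve solve solve_alt
  rw [foldA_snd]
  apply PySem.List.foldl_congr_mem'
  intro p hp t
  have h2 : 1 < p := by have := mem_getPrimes hp; omega
  rw [getD_factorDict _ _ _ hp, getD_factorDict _ _ _ hp, getD_factorDict _ _ _ hp,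
    perPrime _ _ h2, perPrime _ _ h2, perPrime _ _ h2]
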